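-- pv_equiv track=rewrite | github.com/salon64/adventofcode | 2025/day9/day9b.py | validRectangle
-- ===== SOURCE A (Python) =====
-- def validRectangle(a, b, perimeter):
--     min_x = min(a[0], b[0])
--     min_y = min(a[1], b[1])
--     max_x = max(a[0], b[0])
--     max_y = max(a[1], b[1])
--
--     # left
--     for i in range(1, max_y - min_y):
--         first = (min_x, min_y + i)
--         second = (min_x + 1, min_y + i)
--         if first in perimeter and second in perimeter:
--             return False
--
--     # right
--     for i in range(1, max_y - min_y):
--         first = (max_x, min_y + i)
--         second = (max_x - 1, min_y + i)
--         if first in perimeter and second in perimeter: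
--             return False
--
--     # top
--     for i in range(1, max_x - min_x):
--         first = (min_x + i, min_y)
--         second = (min_x + i, min_y + 1)
--         if first in perimeter and second in perimeter:
--             return False
--
--     # down
--     for i in range(1, max_x - min_x):
--         first = (min_x + i, max_y)
--         second = (min_x + i, max_y - 1)
--         if first in perimeter and second in perimeter:
--             return False
--
--     return True
-- ===== SOURCE B (Python) =====
-- def validRectangle(a, b, perimeter):
--     min_x, max_x = min(a[0], b[0]), max(a[0], b[0])
--     min_y, max_y = min(a[1], b[1]), max(a[1], b[1])
--     pts = set(perimeter)
--     for (x, y) in perimeter: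
--         if x == min_x and min_y < y < max_y and (min_x + 1, y) in pts:
--             return False
--         if x == max_x and min_y < y < max_y and (max_x - 1, y) in pts:
--             return False
--         if y == min_y and min_x < x < max_x and (x, min_y + 1) in pts:
--             return False
--         if y == max_y and min_x < x < max_x and (x, max_y - 1) in pts:
--             return False
--     return True
-- ===== Notes on version B (the rewrite author's own statement) =====
-- stated objective: faster
-- what changed: Instead of scanning the four edge coordinate ranges and doing a linear list-membership test for both cells of each pair, B iterates once over the perimeter list itself, classifies each point onto an edge interior by strict inequalities, and tests only its inner neighbour against a prebuilt hash set.
import Mathlib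
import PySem

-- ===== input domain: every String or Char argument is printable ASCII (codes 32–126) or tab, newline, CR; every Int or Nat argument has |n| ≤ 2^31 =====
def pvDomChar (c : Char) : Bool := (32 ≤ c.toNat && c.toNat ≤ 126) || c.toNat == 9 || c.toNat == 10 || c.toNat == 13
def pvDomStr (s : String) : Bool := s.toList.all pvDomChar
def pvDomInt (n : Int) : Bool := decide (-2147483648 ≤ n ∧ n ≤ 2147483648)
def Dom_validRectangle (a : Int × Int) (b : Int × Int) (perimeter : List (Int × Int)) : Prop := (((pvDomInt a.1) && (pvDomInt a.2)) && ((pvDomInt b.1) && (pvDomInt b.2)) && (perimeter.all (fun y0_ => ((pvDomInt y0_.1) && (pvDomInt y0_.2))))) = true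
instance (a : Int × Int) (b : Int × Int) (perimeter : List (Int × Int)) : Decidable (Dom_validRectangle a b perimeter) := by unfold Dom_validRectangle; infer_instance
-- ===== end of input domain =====

-- B iterates over the perimeter points and tests inner neighbours in a set, instead of
-- scanning the four edge coordinate ranges; same result, different traversal (alternative).

-- ===== PORT A =====
def validRectangle (a : Int × Int) (b : Int × Int) (perimeter : List (Int × Int)) : Bool :=
  let min_x := min a.1 b.1
  let min_y := min a.2 b.2
  let max_x := max a.1 b.1
  let max_y := max a.2 b.2
  -- left
  if (PySem.List.pyRange 1 (max_y - min_y) 1).any (fun i =>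
      perimeter.contains (min_x, min_y + i) && perimeter.contains (min_x + 1, min_y + i)) then
    false
  -- right
  else if (PySem.List.pyRange 1 (max_y - min_y) 1).any (fun i =>
      perimeter.contains (max_x, min_y + i) && perimeter.contains (max_x - 1, min_y + i)) then
    false
  -- top
  else if (PySem.List.pyRange 1 (max_x - min_x) 1).any (fun i =>
      perimeter.contains (min_x + i, min_y) && perimeter.contains (min_x + i, min_y + 1)) then
    false
  -- down
  else if (PySem.List.pyRange 1 (max_x - min_x) 1).any (fun i =>
      perimeter.contains (min_x + i, max_y) && perimeter.contains (min_x + i, max_y - 1)) then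
    false
  else
    true

-- ===== PORT B =====
def validRectangle_alt (a : Int × Int) (b : Int × Int) (perimeter : List (Int × Int)) : Bool :=
  let min_x := min a.1 b.1
  let max_x := max a.1 b.1
  let min_y := min a.2 b.2
  let max_y := max a.2 b.2
  let pts : PySem.Set (Int × Int) := PySem.Set.ofList perimeter
  !(perimeter.any (fun p =>
      (p.1 == min_x && decide (min_y < p.2) && decide (p.2 < max_y) && pts.contains (min_x + 1, p.2)) ||
      (p.1 == max_x && decide (min_y < p.2) && decide (p.2 < max_y) && pts.contains (max_x - 1, p.2)) ||
      (p.2 == min_y && decide (min_x < p.1) && decide (p.1 < max_x) && pts.contains (p.1, min_y + 1)) ||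
      (p.2 == max_y && decide (min_x < p.1) && decide (p.1 < max_x) && pts.contains (p.1, max_y - 1))))

-- ===== PRECONDITION & SPEC =====
def Spec_validRectangle (a : Int × Int) (b : Int × Int) (perimeter : List (Int × Int)) (out : Bool) : Prop := out = validRectangle_alt a b perimeter
instance (a : Int × Int) (b : Int × Int) (perimeter : List (Int × Int)) (out : Bool) : Decidable (Spec_validRectangle a b perimeter out) := by unfold Spec_validRectangle; infer_instance

-- ===== CLAIM (what is proved, stated in full; the proofs are below) =====
def Claim_equal_validRectangle : Prop := ∀ (a : Int × Int) (b : Int × Int) (perimeter : List (Int × Int)), Dom_validRectangle a b perimeter → Spec_validRectangle a b perimeter (validRectangle a b perimeter)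

-- ===== LEMMAS AND PROOFS =====

theorem ifchain_eq_not_or (c1 c2 c3 c4 : Bool) :
    (if c1 then false else if c2 then false else if c3 then false else if c4 then false else true)
      = !(c1 || c2 || c3 || c4) := by
  cases c1 <;> cases c2 <;> cases c3 <;> cases c4 <;> rfl

theorem set_contains_mem {α : Type} [BEq α] [LawfulBEq α] (xs : List α) (q : α) :
    ((PySem.Set.ofList xs).contains q = true) ↔ q ∈ xs := by
  simp [PySem.Set.mem_ofList]

theorem validRectangle_eq (a : Int × Int) (b : Int × Int) (perimeter : List (Int × Int)) :
    validRectangle a b perimeter = validRectangle_alt a b perimeter := by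
  unfold validRectangle validRectangle_alt
  rw [ifchain_eq_not_or]
  congr 1
  rw [Bool.eq_iff_iff]
  simp only [Bool.or_eq_true, List.any_eq_true, Bool.and_eq_true, decide_eq_true_eq,
    PySem.List.mem_pyRange_one, List.contains_eq_mem, set_contains_mem, beq_iff_eq]
  constructor
  · intro h
    rcases h with ((h | h) | h) | h
    · obtain ⟨i, ⟨h1, h2⟩, hf, hs⟩ := h
      exact ⟨(min a.1 b.1, min a.2 b.2 + i), hf,
        Or.inl (Or.inl (Or.inl ⟨⟨⟨rfl, by omega⟩, by omega⟩, hs⟩))⟩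
    · obtain ⟨i, ⟨h1, h2⟩, hf, hs⟩ := h
      exact ⟨(max a.1 b.1, min a.2 b.2 + i), hf,
        Or.inl (Or.inl (Or.inr ⟨⟨⟨rfl, by omega⟩, by omega⟩, hs⟩))⟩
    · obtain ⟨i, ⟨h1, h2⟩, hf, hs⟩ := h
      exact ⟨(min a.1 b.1 + i, min a.2 b.2), hf,
        Or.inl (Or.inr ⟨⟨⟨rfl, by omega⟩, by omega⟩, hs⟩)⟩
    · obtain ⟨i, ⟨h1, h2⟩, hf, hs⟩ := h
      exact ⟨(min a.1 b.1 + i, max a.2 b.2), hf,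
        Or.inr ⟨⟨⟨rfl, by omega⟩, by omega⟩, hs⟩⟩
  · intro h
    obtain ⟨p, hp, hc⟩ := h
    rcases hc with ((⟨⟨⟨hx, hy1⟩, hy2⟩, hs⟩ | ⟨⟨⟨hx, hy1⟩, hy2⟩, hs⟩) |
      ⟨⟨⟨hy, hx1⟩, hx2⟩, hs⟩) | ⟨⟨⟨hy, hx1⟩, hx2⟩, hs⟩
    · have e : min a.2 b.2 + (p.2 - min a.2 b.2) = p.2 := by ring
      refine Or.inl (Or.inl (Or.inl ⟨p.2 - min a.2 b.2, ⟨by omega, by omega⟩, ?_, ?_⟩))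
      · rw [e, ← hx, Prod.mk.eta]; exact hp
      · rw [e]; exact hs
    · have e : min a.2 b.2 + (p.2 - min a.2 b.2) = p.2 := by ring
      refine Or.inl (Or.inl (Or.inr ⟨p.2 - min a.2 b.2, ⟨by omega, by omega⟩, ?_, ?_⟩))
      · rw [e, ← hx, Prod.mk.eta]; exact hp
      · rw [e]; exact hs
    · have e : min a.1 b.1 + (p.1 - min a.1 b.1) = p.1 := by ring
      refine Or.inl (Or.inr ⟨p.1 - min a.1 b.1, ⟨by omega, by omega⟩, ?_, ?_⟩)
      · rw [e, ← hy, Prod.mk.eta]; exact hp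
      · rw [e]; exact hs
    · have e : min a.1 b.1 + (p.1 - min a.1 b.1) = p.1 := by ring
      refine Or.inr ⟨p.1 - min a.1 b.1, ⟨by omega, by omega⟩, ?_, ?_⟩
      · rw [e, ← hy, Prod.mk.eta]; exact hp
      · rw [e]; exact hs

-- ===== VERDICT (by name: the statement is the Claim_ definition above) =====
theorem validRectangle_spec : Claim_equal_validRectangle := by
  intro a b perimeter _
  exact validRectangle_eq a b perimeter
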